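-- pv_equiv track=rewrite | github.com/amehr2003/CS4250_Final_Project | driver.py | cut_string_short
-- ===== SOURCE A (Python) =====
-- def cut_string_short(string):
--     string = str(string)
--     i = 0
--     returnString = ""
--     while i < len(string):
--         if i == 75 or i == 150 or i == 225:
--             returnString += "\n"
--         returnString += string[i]
--         i += 1
--         if i > 300:
--             returnString += "... \n"
--             break
--     return returnString
-- ===== SOURCE B (Python) =====
-- def cut_string_short(string):
--     string = str(string)
--     segs = [string[:75], string[75:150], string[150:225], string[225:301]]
--     out = "\n".join(s for s in segs if s)
--     if len(string) > 300:
--         out += "... \n"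
--     return out
-- ===== Notes on version B (the rewrite author's own statement) =====
-- stated objective: simpler
-- what changed: Replaces the per-character while loop with positional branches by four fixed slices at the known boundaries (0/75/150/225/301) joined with newlines, plus the 300-char ellipsis suffix.
import Mathlib
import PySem

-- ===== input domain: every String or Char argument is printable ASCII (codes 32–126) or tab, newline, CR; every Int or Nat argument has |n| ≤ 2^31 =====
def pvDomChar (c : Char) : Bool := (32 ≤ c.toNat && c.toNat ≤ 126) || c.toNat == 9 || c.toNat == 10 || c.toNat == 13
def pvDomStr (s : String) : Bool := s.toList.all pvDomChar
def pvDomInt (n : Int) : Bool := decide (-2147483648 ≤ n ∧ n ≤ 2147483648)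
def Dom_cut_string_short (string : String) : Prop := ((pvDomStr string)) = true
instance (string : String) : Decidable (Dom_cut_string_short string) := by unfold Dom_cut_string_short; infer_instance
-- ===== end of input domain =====

-- B replaces A's per-character while loop by four fixed slices joined with newlines (simpler decomposition, same result).
-- ===== PORT A =====
-- the while loop of A: i counts up, '\n' inserted before positions 75/150/225, break with "... \n" once i exceeds 300
def cutLoopA (cs : List Char) (i : Nat) (acc : List Char) : List Char :=
  if h : i < cs.length then
    let acc1 := if i = 75 ∨ i = 150 ∨ i = 225 then acc ++ ['\n'] else acc
    let acc2 := acc1 ++ [cs[i]]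
    if i + 1 > 300 then acc2 ++ "... \n".toList
    else cutLoopA cs (i + 1) acc2
  else acc
termination_by cs.length - i

-- str(string) on a str is the identity, so A starts the loop directly on the input's characters
def cut_string_short (string : String) : String :=
  String.ofList (cutLoopA string.toList 0 [])

-- ===== PORT B =====
def cutAltList (cs : List Char) : List Char :=
  let segs : List (List Char) :=
    [PySem.List.slice cs none (some 75), PySem.List.slice cs (some 75) (some 150),
     PySem.List.slice cs (some 150) (some 225), PySem.List.slice cs (some 225) (some 301)]
  let out := PySem.Chars.join ['\n'] (segs.filter (fun s => !s.isEmpty))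
  if 300 < cs.length then out ++ "... \n".toList else out

def cut_string_short_alt (string : String) : String :=
  String.ofList (cutAltList string.toList)

-- ===== PRECONDITION & SPEC =====
def Spec_cut_string_short (string : String) (out : String) : Prop := out = cut_string_short_alt string
instance (string : String) (out : String) : Decidable (Spec_cut_string_short string out) := by unfold Spec_cut_string_short; infer_instance

-- ===== CLAIM (what is proved, stated in full; the proofs are below) =====
def Claim_equal_cut_string_short : Prop := ∀ (string : String), Dom_cut_string_short string → Spec_cut_string_short string (cut_string_short string)

-- ===== LEMMAS AND PROOFS =====

-- appending one char to a list of length ≤ 300 extends A's loop output by (newline?) ++ [c] ++ (tail?)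
theorem cutLoopA_append (cs : List Char) (c : Char) (hn : cs.length ≤ 300) :
    ∀ i acc, i ≤ cs.length →
      cutLoopA (cs ++ [c]) i acc =
        cutLoopA cs i acc ++
          ((if cs.length = 75 ∨ cs.length = 150 ∨ cs.length = 225 then ['\n'] else []) ++
            ([c] ++ (if cs.length + 1 > 300 then "... \n".toList else []))) := by
  have key : ∀ fuel i acc, cs.length - i = fuel → i ≤ cs.length →
      cutLoopA (cs ++ [c]) i acc =
        cutLoopA cs i acc ++
          ((if cs.length = 75 ∨ cs.length = 150 ∨ cs.length = 225 then ['\n'] else []) ++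
            ([c] ++ (if cs.length + 1 > 300 then "... \n".toList else []))) := by
    intro fuel
    induction fuel with
    | zero =>
      intro i acc hf hi
      have hie : i = cs.length := by omega
      subst hie
      rw [cutLoopA, cutLoopA]
      have h1 : ¬ cs.length < cs.length := by omega
      have h2 : cs.length < (cs ++ [c]).length := by simp
      rw [dif_neg h1, dif_pos h2]
      have hgc : (cs ++ [c])[cs.length]'h2 = c := by
        simp
      simp only [hgc]
      by_cases hb : cs.length + 1 > 300
      · rw [if_pos hb, if_pos hb]
        by_cases hnl : cs.length = 75 ∨ cs.length = 150 ∨ cs.length = 225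
        · rw [if_pos hnl, if_pos hnl]; simp
        · rw [if_neg hnl, if_neg hnl]; simp
      · rw [if_neg hb, if_neg hb, cutLoopA]
        have h3 : ¬ cs.length + 1 < (cs ++ [c]).length := by simp
        rw [dif_neg h3]
        by_cases hnl : cs.length = 75 ∨ cs.length = 150 ∨ cs.length = 225
        · rw [if_pos hnl, if_pos hnl]; simp
        · rw [if_neg hnl, if_neg hnl]; simp
    | succ n ih =>
      intro i acc hf hi
      have hlt : i < cs.length := by omega
      rw [cutLoopA, cutLoopA]
      have h2 : i < (cs ++ [c]).length := by simp only [List.length_append, List.length_cons, List.length_nil]; omega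
      rw [dif_pos hlt, dif_pos h2]
      have hgc : (cs ++ [c])[i]'h2 = cs[i]'hlt := List.getElem_append_left hlt
      simp only [hgc]
      have hb : ¬ i + 1 > 300 := by omega
      rw [if_neg hb, if_neg hb]
      exact ih (i + 1) _ (by omega) (by omega)
  intro i acc hi
  exact key _ i acc rfl hi

-- join-with-newline of the nonempty segments, after slices are normalised to take/drop
def joinF (l : List (List Char)) : List Char :=
  PySem.Chars.join ['\n'] (l.filter (fun s => !s.isEmpty))

theorem cutAltList_norm (cs : List Char) :
    cutAltList cs =
      joinF [cs.take 75, (cs.drop 75).take 75, (cs.drop 150).take 75, (cs.drop 225).take 76] ++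
        (if 300 < cs.length then "... \n".toList else []) := by
  unfold cutAltList joinF
  simp only [PySem.List.slice_toNat _ (by norm_num : (0:Int) ≤ 75) (by norm_num : (0:Int) ≤ 150),
    PySem.List.slice_toNat _ (by norm_num : (0:Int) ≤ 150) (by norm_num : (0:Int) ≤ 225),
    PySem.List.slice_toNat _ (by norm_num : (0:Int) ≤ 225) (by norm_num : (0:Int) ≤ 301),
    PySem.List.slice_to _ (by norm_num : (0:Int) ≤ 75)]
  split <;> simp

theorem joinF_one (a : List Char) : joinF [a, [], [], []] = a := by
  cases a <;> simp [joinF, List.filter, PySem.Chars.join_nil, PySem.Chars.join_singleton]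

theorem joinF_two (a b : List Char) (ha : a ≠ []) (hb : b ≠ []) :
    joinF [a, b, [], []] = a ++ '\n' :: b := by
  obtain ⟨x, xs, rfl⟩ := List.exists_cons_of_ne_nil ha
  obtain ⟨y, ys, rfl⟩ := List.exists_cons_of_ne_nil hb
  simp [joinF, List.filter, PySem.Chars.join_cons_cons, PySem.Chars.join_singleton]

theorem joinF_three (a b c : List Char) (ha : a ≠ []) (hb : b ≠ []) (hc : c ≠ []) :
    joinF [a, b, c, []] = a ++ '\n' :: (b ++ '\n' :: c) := by
  obtain ⟨x, xs, rfl⟩ := List.exists_cons_of_ne_nil ha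
  obtain ⟨y, ys, rfl⟩ := List.exists_cons_of_ne_nil hb
  obtain ⟨z, zs, rfl⟩ := List.exists_cons_of_ne_nil hc
  simp [joinF, List.filter, PySem.Chars.join_cons_cons, PySem.Chars.join_singleton]

theorem joinF_four (a b c d : List Char) (ha : a ≠ []) (hb : b ≠ []) (hc : c ≠ []) (hd : d ≠ []) :
    joinF [a, b, c, d] = a ++ '\n' :: (b ++ '\n' :: (c ++ '\n' :: d)) := by
  obtain ⟨x, xs, rfl⟩ := List.exists_cons_of_ne_nil ha
  obtain ⟨y, ys, rfl⟩ := List.exists_cons_of_ne_nil hb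
  obtain ⟨z, zs, rfl⟩ := List.exists_cons_of_ne_nil hc
  obtain ⟨w, ws, rfl⟩ := List.exists_cons_of_ne_nil hd
  simp [joinF, List.filter, PySem.Chars.join_cons_cons, PySem.Chars.join_singleton]

-- same recurrence for B
theorem cutAltList_append (cs : List Char) (c : Char) (hn : cs.length ≤ 300) :
    cutAltList (cs ++ [c]) =
      cutAltList cs ++
        ((if cs.length = 75 ∨ cs.length = 150 ∨ cs.length = 225 then ['\n'] else []) ++
          ([c] ++ (if cs.length + 1 > 300 then "... \n".toList else []))) := by
  have hlen : (cs ++ [c]).length = cs.length + 1 := by simp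
  have htail : ¬ 300 < cs.length := by omega
  rw [cutAltList_norm, cutAltList_norm, hlen, if_neg htail]
  by_cases h1 : cs.length < 75
  · have e1 : (cs ++ [c]).take 75 = cs.take 75 ++ [c] := by
      rw [List.take_of_length_le (by simp only [List.length_append, List.length_cons, List.length_nil]; omega),
        List.take_of_length_le (by omega)]
    have e2 : (cs ++ [c]).drop 75 = [] := List.drop_eq_nil_of_le (by simp only [List.length_append, List.length_cons, List.length_nil]; omega)
    have e3 : (cs ++ [c]).drop 150 = [] := List.drop_eq_nil_of_le (by simp only [List.length_append, List.length_cons, List.length_nil]; omega)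
    have e4 : (cs ++ [c]).drop 225 = [] := List.drop_eq_nil_of_le (by simp only [List.length_append, List.length_cons, List.length_nil]; omega)
    have f2 : cs.drop 75 = [] := List.drop_eq_nil_of_le (by omega)
    have f3 : cs.drop 150 = [] := List.drop_eq_nil_of_le (by omega)
    have f4 : cs.drop 225 = [] := List.drop_eq_nil_of_le (by omega)
    rw [e1, e2, e3, e4, f2, f3, f4, List.take_of_length_le (l := cs) (by omega)]
    simp only [List.take_nil]
    rw [joinF_one, joinF_one, if_neg (by omega : ¬ 300 < cs.length + 1),
      if_neg (by omega : ¬ (cs.length = 75 ∨ cs.length = 150 ∨ cs.length = 225))]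
    simp
  · have ha : cs.take 75 ≠ [] := by
      apply List.ne_nil_of_length_pos; simp only [List.length_take]; omega
    have e1 : (cs ++ [c]).take 75 = cs.take 75 := List.take_append_of_le_length (by omega)
    by_cases h2 : cs.length < 150
    · have e2 : ((cs ++ [c]).drop 75).take 75 = cs.drop 75 ++ [c] := by
        rw [List.drop_append_of_le_length (by omega),
          List.take_of_length_le (by simp only [List.length_append, List.length_drop, List.length_cons, List.length_nil]; omega)]
      have e3 : (cs ++ [c]).drop 150 = [] := List.drop_eq_nil_of_le (by simp only [List.length_append, List.length_cons, List.length_nil]; omega)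
      have e4 : (cs ++ [c]).drop 225 = [] := List.drop_eq_nil_of_le (by simp only [List.length_append, List.length_cons, List.length_nil]; omega)
      have f3 : cs.drop 150 = [] := List.drop_eq_nil_of_le (by omega)
      have f4 : cs.drop 225 = [] := List.drop_eq_nil_of_le (by omega)
      rw [e1, e2, e3, e4, f3, f4]
      simp only [List.take_nil]
      rw [joinF_two _ _ ha (by simp), if_neg (by omega : ¬ 300 < cs.length + 1)]
      by_cases h75 : cs.length = 75
      · have f2 : cs.drop 75 = [] := List.drop_eq_nil_of_le (by omega)
        rw [f2, List.take_nil, joinF_one, if_pos (Or.inl h75)]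
        simp
      · have f2 : (cs.drop 75).take 75 = cs.drop 75 :=
          List.take_of_length_le (by simp only [List.length_drop]; omega)
        have hb : cs.drop 75 ≠ [] := by
          apply List.ne_nil_of_length_pos; simp only [List.length_drop]; omega
        rw [f2, joinF_two _ _ ha hb, if_neg (by omega)]
        simp
    · have e2 : ((cs ++ [c]).drop 75).take 75 = (cs.drop 75).take 75 := by
        rw [List.drop_append_of_le_length (by omega), List.take_append_of_le_length (by simp only [List.length_drop]; omega)]
      have hb' : (cs.drop 75).take 75 ≠ [] := by
        apply List.ne_nil_of_length_pos; simp only [List.length_take, List.length_drop]; omega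
      by_cases h3 : cs.length < 225
      · have e3 : ((cs ++ [c]).drop 150).take 75 = cs.drop 150 ++ [c] := by
          rw [List.drop_append_of_le_length (by omega),
            List.take_of_length_le (by simp only [List.length_append, List.length_drop, List.length_cons, List.length_nil]; omega)]
        have e4 : (cs ++ [c]).drop 225 = [] := List.drop_eq_nil_of_le (by simp only [List.length_append, List.length_cons, List.length_nil]; omega)
        have f4 : cs.drop 225 = [] := List.drop_eq_nil_of_le (by omega)
        rw [e1, e2, e3, e4, f4]
        simp only [List.take_nil]
        rw [joinF_three _ _ _ ha hb' (by simp), if_neg (by omega : ¬ 300 < cs.length + 1)]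
        by_cases h150 : cs.length = 150
        · have f3 : cs.drop 150 = [] := List.drop_eq_nil_of_le (by omega)
          rw [f3, List.take_nil, joinF_two _ _ ha hb', if_pos (Or.inr (Or.inl h150))]
          simp
        · have f3 : (cs.drop 150).take 75 = cs.drop 150 :=
            List.take_of_length_le (by simp only [List.length_drop]; omega)
          have hc : cs.drop 150 ≠ [] := by
            apply List.ne_nil_of_length_pos; simp only [List.length_drop]; omega
          rw [f3, joinF_three _ _ _ ha hb' hc, if_neg (by omega)]
          simp
      · have hc' : (cs.drop 150).take 75 ≠ [] := by
          apply List.ne_nil_of_length_pos; simp only [List.length_take, List.length_drop]; omega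
        have e3 : ((cs ++ [c]).drop 150).take 75 = (cs.drop 150).take 75 := by
          rw [List.drop_append_of_le_length (by omega), List.take_append_of_le_length (by simp only [List.length_drop]; omega)]
        have e4 : ((cs ++ [c]).drop 225).take 76 = cs.drop 225 ++ [c] := by
          rw [List.drop_append_of_le_length (by omega),
            List.take_of_length_le (by simp only [List.length_append, List.length_drop, List.length_cons, List.length_nil]; omega)]
        rw [e1, e2, e3, e4]
        rw [joinF_four _ _ _ _ ha hb' hc' (by simp)]
        by_cases h225 : cs.length = 225
        · have f4 : cs.drop 225 = [] := List.drop_eq_nil_of_le (by omega)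
          rw [f4, List.take_nil, joinF_three _ _ _ ha hb' hc', if_pos (Or.inr (Or.inr h225)),
            if_neg (by omega : ¬ 300 < cs.length + 1)]
          simp
        · have f4 : (cs.drop 225).take 76 = cs.drop 225 :=
            List.take_of_length_le (by simp only [List.length_drop]; omega)
          have hd : cs.drop 225 ≠ [] := by
            apply List.ne_nil_of_length_pos; simp only [List.length_drop]; omega
          rw [f4, joinF_four _ _ _ _ ha hb' hc' hd, if_neg (by omega : ¬ (cs.length = 75 ∨ cs.length = 150 ∨ cs.length = 225))]
          by_cases h300 : cs.length = 300
          · rw [if_pos (by omega : 300 < cs.length + 1)]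
            simp
          · rw [if_neg (by omega : ¬ 300 < cs.length + 1)]
            simp

theorem main_short (cs : List Char) (h : cs.length ≤ 301) :
    cutLoopA cs 0 [] = cutAltList cs := by
  induction cs using List.reverseRecOn with
  | nil => simp [cutLoopA, cutAltList]; decide
  | append_singleton ds c ih =>
    have hd : ds.length ≤ 300 := by simp at h; omega
    rw [cutLoopA_append ds c hd 0 [] (Nat.zero_le _),
        cutAltList_append ds c hd, ih (by omega)]

-- beyond index 300 neither side looks at the input: both agree with their value on take 301
theorem cutLoopA_take (cs : List Char) (h : 301 ≤ cs.length) :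
    ∀ i acc, i ≤ 300 → cutLoopA cs i acc = cutLoopA (cs.take 301) i acc := by
  have hl : (cs.take 301).length = 301 := by simp only [List.length_take]; omega
  have key : ∀ fuel i acc, 301 - i = fuel → i ≤ 300 →
      cutLoopA cs i acc = cutLoopA (cs.take 301) i acc := by
    intro fuel
    induction fuel with
    | zero => intro i acc hf hi; omega
    | succ n ih =>
      intro i acc hf hi
      rw [cutLoopA, cutLoopA]
      have h1 : i < cs.length := by omega
      have h2 : i < (cs.take 301).length := by omega
      rw [dif_pos h1, dif_pos h2]
      have hg : (cs.take 301)[i]'h2 = cs[i]'h1 := List.getElem_take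
      simp only [hg]
      by_cases hb : i + 1 > 300
      · rw [if_pos hb, if_pos hb]
      · rw [if_neg hb, if_neg hb]
        exact ih (i + 1) _ (by omega) (by omega)
  intro i acc hi
  exact key _ i acc rfl hi

theorem cutAltList_take (cs : List Char) (h : 301 ≤ cs.length) :
    cutAltList cs = cutAltList (cs.take 301) := by
  have hl : (cs.take 301).length = 301 := by simp only [List.length_take]; omega
  rw [cutAltList_norm, cutAltList_norm, hl, if_pos (by omega), if_pos (by norm_num : (300:Nat) < 301)]
  simp [List.drop_take, List.take_take]

theorem main_lemma (cs : List Char) : cutLoopA cs 0 [] = cutAltList cs := by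
  by_cases h : cs.length ≤ 301
  · exact main_short cs h
  · rw [cutLoopA_take cs (by omega) 0 [] (by omega), cutAltList_take cs (by omega)]
    exact main_short _ (by simp)

-- ===== VERDICT (by name: the statement is the Claim_ definition above) =====
theorem cut_string_short_spec : Claim_equal_cut_string_short := by
  intro s _
  unfold Spec_cut_string_short cut_string_short cut_string_short_alt
  rw [main_lemma]
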